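-- pv_equiv track=rewrite | github.com/PerrottaJulian/paradigmas-2023 | paradigmas2023_parcial.py | puntajes
-- ===== SOURCE A (Python) =====
-- def valor_resultado(resultado):
--     resultado = resultado.lower()
--     if resultado == "g":
--         return 3
--     elif resultado == "e":
--         return 1
--     else:
--         return 0
--
-- def puntajes(dict_equipos):
--     equipos_puntos = dict()
--     for n_equipo, resultados in dict_equipos.items():
--         lista_puntos = []
--
--         for resultado in resultados:
--             puntos = valor_resultado(resultado)
--             lista_puntos.append(puntos)
--         equipos_puntos[n_equipo] = sum(lista_puntos)
--
--     return equipos_puntos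
-- ===== SOURCE B (Python) =====
-- def puntajes(dict_equipos):
--     def score(resultados):
--         bajados = [r.lower() for r in resultados]
--         return 3 * bajados.count("g") + bajados.count("e")
--     return {n_equipo: score(resultados) for n_equipo, resultados in dict_equipos.items()}
-- ===== Notes on version B (the rewrite author's own statement) =====
-- stated objective: simpler
-- what changed: Instead of scoring each result via a per-element valor_resultado loop that appends points to a list and then sums it, B lowercases the results once and computes each team's score directly as a weighted count: 3*count('g') + count('e').
import Mathlib
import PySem

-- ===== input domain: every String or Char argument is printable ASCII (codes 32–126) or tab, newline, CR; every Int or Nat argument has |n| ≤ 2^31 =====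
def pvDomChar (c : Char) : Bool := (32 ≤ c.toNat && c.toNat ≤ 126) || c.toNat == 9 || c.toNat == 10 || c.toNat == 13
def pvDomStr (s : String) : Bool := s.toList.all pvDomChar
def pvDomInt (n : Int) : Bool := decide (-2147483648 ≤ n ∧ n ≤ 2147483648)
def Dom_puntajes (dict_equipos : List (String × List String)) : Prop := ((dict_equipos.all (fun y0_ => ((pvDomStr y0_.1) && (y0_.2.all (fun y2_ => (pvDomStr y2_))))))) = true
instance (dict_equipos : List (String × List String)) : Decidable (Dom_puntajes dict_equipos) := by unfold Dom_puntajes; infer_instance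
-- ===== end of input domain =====

-- B replaces the per-result scoring loop with a weighted count (3*count 'g' + count 'e') over the lowercased results; objective: simpler.
-- ===== PORT A =====
def valor_resultado (resultado : String) : Int :=
  let resultado := PySem.Str.lower resultado
  if resultado = "g" then 3
  else if resultado = "e" then 1
  else 0

def puntajes (dict_equipos : List (String × List String)) : List (String × Int) :=
  (dict_equipos.foldl (fun equipos_puntos p =>
    let lista_puntos := p.2.foldl (fun l resultado => l ++ [valor_resultado resultado]) []
    PySem.Dict.insert equipos_puntos p.1 (lista_puntos.foldl (· + ·) 0)) PySem.Dict.empty).items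

-- ===== PORT B =====
def puntajes_score (resultados : List String) : Int :=
  let bajados := resultados.map PySem.Str.lower
  3 * (PySem.List.count bajados "g") + (PySem.List.count bajados "e")

def puntajes_alt (dict_equipos : List (String × List String)) : List (String × Int) :=
  (dict_equipos.foldl (fun equipos_puntos p =>
    PySem.Dict.insert equipos_puntos p.1 (puntajes_score p.2)) PySem.Dict.empty).items

-- ===== PRECONDITION & SPEC =====
def Spec_puntajes (dict_equipos : List (String × List String)) (out : List (String × Int)) : Prop := out = puntajes_alt dict_equipos
instance (dict_equipos : List (String × List String)) (out : List (String × Int)) : Decidable (Spec_puntajes dict_equipos out) := by unfold Spec_puntajes; infer_instance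

-- ===== CLAIM (what is proved, stated in full; the proofs are below) =====
def Claim_equal_puntajes : Prop := ∀ (dict_equipos : List (String × List String)), Dom_puntajes dict_equipos → Spec_puntajes dict_equipos (puntajes dict_equipos)

-- ===== LEMMAS AND PROOFS =====

lemma foldl_append_valor (rs : List String) (init : List Int) :
    rs.foldl (fun l resultado => l ++ [valor_resultado resultado]) init = init ++ rs.map valor_resultado := by
  induction rs generalizing init with
  | nil => simp
  | cons r rs ih => simp [List.foldl, ih]

lemma sum_valor (rs : List String) :
    (rs.map valor_resultado).foldl (· + ·) 0 = puntajes_score rs := by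
  have h : ∀ (init : Int), (rs.map valor_resultado).foldl (· + ·) init = init + puntajes_score rs := by
    induction rs with
    | nil => intro init; simp [puntajes_score, PySem.List.count]
    | cons r rs ih =>
      intro init
      simp only [List.map, List.foldl, ih]
      simp only [puntajes_score, PySem.List.count, List.map, List.count_cons, valor_resultado]
      by_cases hg : PySem.Str.lower r = "g" <;> by_cases he : PySem.Str.lower r = "e" <;>
        simp [hg, he] <;> ring
  simpa using h 0

lemma foldl_eq (d : List (String × List String)) (acc : PySem.Dict String Int) :
    d.foldl (fun equipos_puntos p =>
      let lista_puntos := p.2.foldl (fun l resultado => l ++ [valor_resultado resultado]) []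
      PySem.Dict.insert equipos_puntos p.1 (lista_puntos.foldl (· + ·) 0)) acc
    = d.foldl (fun equipos_puntos p =>
      PySem.Dict.insert equipos_puntos p.1 (puntajes_score p.2)) acc := by
  induction d generalizing acc with
  | nil => rfl
  | cons p d ih =>
    simp only [List.foldl]
    rw [foldl_append_valor, List.nil_append, sum_valor, ih]

-- ===== VERDICT (by name: the statement is the Claim_ definition above) =====
theorem puntajes_spec : Claim_equal_puntajes := by
  intro dict_equipos _
  unfold Spec_puntajes puntajes puntajes_alt
  exact congrArg PySem.Dict.items (foldl_eq dict_equipos PySem.Dict.empty)
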